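-- pv_equiv track=rewrite | github.com/chrisxkeith/mbox-to-kml | mbox-to-kml.py | extract_png_data
-- ===== SOURCE A (Python) =====
-- def extract_png_data(thePart):
--     pastHeaders = False
--     pngData = ''
--     for aLine in thePart.split('\n'):
--         if pastHeaders:
--             pngData = pngData + (aLine + '\n')
--         if aLine == '':
--             pastHeaders = True
--     return pngData
-- ===== SOURCE B (Python) =====
-- def extract_png_data(thePart):
--     lines = thePart.split('\n')
--     try:
--         index = lines.index('')
--     except ValueError:
--         return ''
--     return ''.join(line + '\n' for line in lines[index + 1:])
-- ===== Notes on version B (the rewrite author's own statement) =====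
-- stated objective: simpler
-- what changed: Replaces A's boolean-flag single pass that concatenates line by line with a locate-the-first-blank-line (list index, catching ValueError) then slice-and-join decomposition.
import Mathlib
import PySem

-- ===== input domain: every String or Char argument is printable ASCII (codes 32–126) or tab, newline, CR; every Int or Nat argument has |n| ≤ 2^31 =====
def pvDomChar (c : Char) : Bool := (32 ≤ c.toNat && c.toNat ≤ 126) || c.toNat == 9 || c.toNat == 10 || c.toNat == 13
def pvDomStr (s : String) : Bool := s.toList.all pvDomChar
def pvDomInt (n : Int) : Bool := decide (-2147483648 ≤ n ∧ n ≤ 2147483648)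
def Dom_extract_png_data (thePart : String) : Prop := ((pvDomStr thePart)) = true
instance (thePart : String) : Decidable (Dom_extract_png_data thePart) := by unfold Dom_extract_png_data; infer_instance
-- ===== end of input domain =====

-- B replaces A's boolean-flag single pass with find-first-blank-line then slice-and-join (simpler decomposition; same cost).


-- ===== PORT A =====
-- one loop iteration of A: state = (pastHeaders, pngData)
def pvStepA (st : Bool × List Char) (aLine : List Char) : Bool × List Char :=
  let pngData := if st.1 then st.2 ++ (aLine ++ ['\n']) else st.2
  let pastHeaders := if aLine = [] then true else st.1
  (pastHeaders, pngData)

def extract_png_data (thePart : String) : String :=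
  let r := (PySem.Chars.splitOn thePart.toList ['\n']).foldl pvStepA (false, [])
  String.ofList r.2

-- ===== PORT B =====
def extract_png_data_alt (thePart : String) : String :=
  let lines := PySem.Chars.splitOn thePart.toList ['\n']
  match PySem.List.index? lines ([] : List Char) with
  | none => ""
  | some index =>
      String.ofList (PySem.Chars.join [] ((lines.drop (index + 1)).map (fun line => line ++ ['\n'])))

-- ===== PRECONDITION & SPEC =====
def Spec_extract_png_data (thePart : String) (out : String) : Prop := out = extract_png_data_alt thePart
instance (thePart : String) (out : String) : Decidable (Spec_extract_png_data thePart out) := by unfold Spec_extract_png_data; infer_instance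

-- ===== CLAIM (what is proved, stated in full; the proofs are below) =====
def Claim_equal_extract_png_data : Prop := ∀ (thePart : String), Dom_extract_png_data thePart → Spec_extract_png_data thePart (extract_png_data thePart)

-- ===== LEMMAS AND PROOFS =====

theorem pvJoin_nil_eq_flatten (xs : List (List Char)) : PySem.Chars.join [] xs = xs.flatten := by
  induction xs with
  | nil => simp [PySem.Chars.join, List.intercalate]
  | cons x l ih =>
      cases l with
      | nil => simp [PySem.Chars.join, List.intercalate]
      | cons y r =>
          rw [PySem.Chars.join_cons_cons]
          simp [ih]

-- once the flag is true, the loop appends every remaining line (with '\n') to the accumulator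
theorem pvFoldA_true (ls : List (List Char)) : ∀ (acc : List Char),
    (ls.foldl pvStepA (true, acc)).2 = acc ++ PySem.Chars.join [] (ls.map (fun l => l ++ ['\n'])) := by
  induction ls with
  | nil => intro acc; simp [PySem.Chars.join_nil]
  | cons x l ih =>
      intro acc
      have hstep : pvStepA (true, acc) x = (true, acc ++ (x ++ ['\n'])) := by
        simp [pvStepA]
      simp only [List.foldl_cons, hstep, ih, List.map_cons, pvJoin_nil_eq_flatten]
      simp

-- with the flag still false, the result is the join of the lines after the first empty line
theorem pvFoldA_false (ls : List (List Char)) : ∀ (acc : List Char),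
    (ls.foldl pvStepA (false, acc)).2 =
      acc ++ (match PySem.List.index? ls ([] : List Char) with
              | none => []
              | some i => PySem.Chars.join [] ((ls.drop (i + 1)).map (fun l => l ++ ['\n']))) := by
  induction ls with
  | nil => intro acc; simp [PySem.List.index?]
  | cons x l ih =>
      intro acc
      by_cases hx : x = ([] : List Char)
      · subst hx
        have hstep : pvStepA (false, acc) ([] : List Char) = (true, acc) := by
          simp [pvStepA]
        simp only [List.foldl_cons, hstep, pvFoldA_true, PySem.List.index?_cons_self]
        simp
      · have hstep : pvStepA (false, acc) x = (false, acc) := by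
          simp [pvStepA, hx]
        rw [List.foldl_cons, hstep, ih acc, PySem.List.index?_cons_of_ne l hx]
        cases PySem.List.index? l ([] : List Char) with
        | none => simp
        | some i => simp

-- ===== VERDICT (by name: the statement is the Claim_ definition above) =====
theorem extract_png_data_spec : Claim_equal_extract_png_data := by
  intro thePart _
  unfold Spec_extract_png_data extract_png_data extract_png_data_alt
  simp only []
  rw [pvFoldA_false]
  cases PySem.List.index? (PySem.Chars.splitOn thePart.toList ['\n']) ([] : List Char) with
  | none => simp
  | some i => simp
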